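-- pv_equiv track=rewrite | github.com/DeepSpace-Shinku/cs61a | hw/hw03/hw03.py | missing_digits
-- ===== SOURCE A (Python) =====
-- def missing_digits(n):
--     """Given a number a that is in sorted, increasing order,
--     return the number of missing digits in n. A missing digit is
--     a number between the first and last digit of a that is not in n.
--     >>> missing_digits(1248) # 3, 5, 6, 7
--     4
--     >>> missing_digits(1122) # No missing numbers
--     0
--     >>> missing_digits(123456) # No missing numbers
--     0
--     >>> missing_digits(3558) # 4, 6, 7
--     3
--     >>> missing_digits(35578) # 4, 6
--     2
--     >>> missing_digits(12456) # 3
--     1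
--     >>> missing_digits(16789) # 2, 3, 4, 5
--     4
--     >>> missing_digits(19) # 2, 3, 4, 5, 6, 7, 8
--     7
--     >>> missing_digits(4) # No missing numbers between 4 and 4
--     0
--     >>> from construct_check import check
--     >>> # ban while or for loops
--     >>> check(HW_SOURCE_FILE, 'missing_digits', ['While', 'For'])
--     True
--     """
--     "*** YOUR CODE HERE ***"
--     if not n // 10:
--         return 0
--     else:
--         last, second_last = n % 10, n // 10 % 10
--         if last == second_last:
--             return missing_digits(n // 10)
--         else:
--             return (last - second_last - 1) + missing_digits(n // 10)
-- ===== SOURCE B (Python) =====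
-- def missing_digits(n):
--     digits = [n % 10]
--     n //= 10
--     while n:
--         digits.append(n % 10)
--         n //= 10
--     return sum(b - a - 1 for a, b in zip(digits[1:], digits) if a != b)
-- ===== Notes on version B (the rewrite author's own statement) =====
-- stated objective: alternative
-- what changed: Replaces A's interleaved non-tail recursion with two staged passes: a loop that materializes the digit list (least-significant first), then a zip over adjacent pairs summing the gaps.
import Mathlib
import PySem

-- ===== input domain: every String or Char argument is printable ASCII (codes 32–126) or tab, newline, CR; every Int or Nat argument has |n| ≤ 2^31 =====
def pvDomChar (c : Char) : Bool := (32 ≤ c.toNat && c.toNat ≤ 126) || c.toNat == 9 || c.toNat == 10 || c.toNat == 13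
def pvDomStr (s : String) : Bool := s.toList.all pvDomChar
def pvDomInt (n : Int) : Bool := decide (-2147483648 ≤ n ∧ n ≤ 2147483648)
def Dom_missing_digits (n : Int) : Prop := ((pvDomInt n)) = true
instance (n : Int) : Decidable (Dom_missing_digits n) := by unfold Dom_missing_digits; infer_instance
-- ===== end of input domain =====

-- B replaces A's per-digit recursion by two staged passes: first materialize the digit list
-- (least-significant first), then sum gaps over adjacent pairs via zip; same value on Pre_ (n ≥ 0).


-- ===== PORT A =====
-- A's recursion on n // 10 does not terminate for n < 0 (Python hits RecursionError there,
-- excluded by Pre_); for n ≥ 0 Python's // and % on nonnegative ints coincide with Nat / and %,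
-- so the recursion is carried out on n.toNat — exact on the whole Pre_ domain.
-- Termination lemmas for the ports, cited by name in decreasing_by.
theorem pv_div10_lt (n : Nat) (h : ¬ n / 10 = 0) : n / 10 < n :=
  Nat.div_lt_self (Nat.pos_of_ne_zero (fun e => h (by simp [e]))) (by omega)
theorem pv_div10_lt_of_ne (n : Nat) (h : ¬ n = 0) : n / 10 < n :=
  Nat.div_lt_self (Nat.pos_of_ne_zero h) (by omega)

def missingDigitsRec (n : Nat) : Int :=
  if h : n / 10 = 0 then 0
  else
    let last : Int := (n % 10 : Nat)
    let second_last : Int := (n / 10 % 10 : Nat)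
    if last = second_last then missingDigitsRec (n / 10)
    else (last - second_last - 1) + missingDigitsRec (n / 10)
decreasing_by all_goals exact pv_div10_lt n h

def missing_digits (n : Int) : Int := missingDigitsRec n.toNat

-- ===== PORT B =====
-- Phase 1 of B: the `while n:` loop appending n % 10; tail recursion on the same Nat
-- (exact for n ≥ 0; B's loop never exits for n < 0, outside Pre_).
def mdDigitsLoop (n : Nat) (digits : List Int) : List Int :=
  if n = 0 then digits
  else mdDigitsLoop (n / 10) (digits ++ [((n % 10 : Nat) : Int)])
termination_by n
decreasing_by exact pv_div10_lt_of_ne n (by omega)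

-- Phase 2 of B: sum(b - a - 1 for a, b in zip(digits[1:], digits) if a != b);
-- digits[1:] is ported by hand as List.drop 1 (exact for every list).
def missing_digits_alt (n : Int) : Int :=
  let digits := mdDigitsLoop (n.toNat / 10) [((n.toNat % 10 : Nat) : Int)]
  (List.zip (digits.drop 1) digits).foldl
    (fun acc p => if p.1 ≠ p.2 then acc + (p.2 - p.1 - 1) else acc) 0

-- ===== PRECONDITION & SPEC =====
-- Pre_ excludes n < 0, on which A's recursion never bottoms out (Python raises RecursionError)
-- and B's loop never terminates; neither program returns a value there.
def Pre_missing_digits (n : Int) : Prop := 0 ≤ n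
instance (n : Int) : Decidable (Pre_missing_digits n) := by unfold Pre_missing_digits; infer_instance
def pvWitness_missing_digits : Int := (1248)

def Spec_missing_digits (n : Int) (out : Int) : Prop := out = missing_digits_alt n
instance (n : Int) (out : Int) : Decidable (Spec_missing_digits n out) := by unfold Spec_missing_digits; infer_instance

-- ===== CLAIM =====
def Claim_equal_missing_digits : Prop := ∀ (n : Int), Dom_missing_digits n → Pre_missing_digits n → Spec_missing_digits n (missing_digits n)

-- ===== LEMMAS AND PROOFS =====
-- The digit list in direct (non-accumulator) form.
def mdAux (n : Nat) : List Int :=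
  if h : n = 0 then [] else ((n % 10 : Nat) : Int) :: mdAux (n / 10)
termination_by n
decreasing_by exact pv_div10_lt_of_ne n h

theorem mdDigitsLoop_eq (n : Nat) : ∀ acc : List Int, mdDigitsLoop n acc = acc ++ mdAux n := by
  induction n using Nat.strong_induction_on with
  | _ n IH =>
    intro acc
    rw [mdDigitsLoop, mdAux]
    by_cases h : n = 0
    · simp [h]
    · have hlt : n / 10 < n := Nat.div_lt_self (Nat.pos_of_ne_zero h) (by omega)
      simp [h, IH _ hlt]

def mdGap (p : Int × Int) : Int := if p.1 ≠ p.2 then p.2 - p.1 - 1 else 0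

theorem md_foldl_eq_sum (l : List (Int × Int)) : ∀ a : Int,
    l.foldl (fun acc p => if p.1 ≠ p.2 then acc + (p.2 - p.1 - 1) else acc) a
      = a + (l.map mdGap).sum := by
  induction l with
  | nil => intro a; simp
  | cons p t IH =>
    intro a
    simp only [List.foldl_cons, List.map_cons, List.sum_cons, IH, mdGap]
    split_ifs <;> ring

-- Adjacent-pair gap sum of B's digit list equals A's recursion.
theorem missingDigitsRec_eq_pairsum (n : Nat) :
    missingDigitsRec n
      = ((List.zip (mdAux (n / 10)) (((n % 10 : Nat) : Int) :: mdAux (n / 10))).map mdGap).sum := by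
  induction n using Nat.strong_induction_on with
  | _ n IH =>
    rw [missingDigitsRec]
    by_cases h : n / 10 = 0
    · rw [dif_pos h, h, mdAux]
      simp
    · have hlt : n / 10 < n := Nat.div_lt_self (Nat.pos_of_ne_zero (by omega)) (by omega)
      rw [dif_neg h, mdAux, dif_neg h, List.zip_cons_cons, List.map_cons, List.sum_cons,
        ← IH _ hlt, mdGap]
      simp only []
      split_ifs with h1 h2 h2 <;> omega

-- ===== VERDICT =====
theorem missing_digits_spec : Claim_equal_missing_digits := by
  intro n _ _
  unfold Spec_missing_digits missing_digits missing_digits_alt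
  rw [mdDigitsLoop_eq, missingDigitsRec_eq_pairsum]
  simp only [List.singleton_append, List.drop_succ_cons, List.drop_zero]
  rw [md_foldl_eq_sum, zero_add]
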